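-- pv_equiv track=rewrite | github.com/kiwibot-data/mds-provider-api | app/services/transformers.py | get_robot_model_from_id
-- ===== SOURCE A (Python) =====
-- def get_robot_model_from_id(robot_id: str) -> str:
--     """
--     Determine robot model based on robot_id following the specified pattern.
--
--     Args:
--         robot_id: Robot identifier string
--
--     Returns:
--         Robot model string
--     """
--     try:
--         # Extract prefix and number from robot_id
--         # Assuming robot_id format like "4A001", "4B123", etc.
--         if len(robot_id) >= 3:
--             prefix = robot_id[:2]  # First 2 characters
--             number_str = robot_id[2:]  # Rest of the string
--
--             # Try to extract number from the string
--             number = None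
--             for i, char in enumerate(number_str):
--                 if not char.isdigit():
--                     number = int(number_str[:i]) if i > 0 else None
--                     break
--             else:
--                 number = int(number_str)
--
--             if number is not None:
--                 # Apply the model determination logic
--                 if prefix == "4A" and 1 <= number <= 30:
--                     return "Kiwibot 4.0"
--                 elif prefix == "4B" and 1 <= number <= 120:
--                     return "Kiwibot 4.1A"
--                 elif prefix == "4C" and 1 <= number <= 100:
--                     return "Kiwibot 4.1B"
--                 elif prefix == "4D" and 1 <= number <= 300:
--                     return "Kiwibot 4.2A"
--                 elif prefix == "4E" and 1 <= number <= 120: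
--                     return "Kiwibot 4.3B"
--                 elif prefix == "4E" and 121 <= number <= 130:
--                     return "Kiwibot 4.3C"
--                 elif prefix == "4E" and 200 <= number <= 290:
--                     return "Kiwibot 4.3C"
--                 elif prefix == "4F" and 1 <= number <= 262:
--                     return "Kiwibot 4.3D"
--                 elif prefix == "4F" and 301 <= number <= 322:
--                     return "Kiwibot 4.3E"
--                 elif prefix == "4F" and 401 <= number <= 410:
--                     return "Kiwibot 4.3F"
--                 elif prefix == "4G" and 1 <= number <= 5:
--                     return "Kiwibot 4.3G"
--                 elif prefix == "4H" and 1 <= number <= 81: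
--                     return "Kiwibot 4.4A"
--
--         return "Unknown Version"
--     except (ValueError, IndexError):
--         return "Unknown Version"
-- ===== SOURCE B (Python) =====
-- _DIGITS = "0123456789"
--
--
-- def _build_models():
--     models = {}
--     for p, lo, hi, m in [
--         ("4A", 1, 30, "Kiwibot 4.0"),
--         ("4B", 1, 120, "Kiwibot 4.1A"),
--         ("4C", 1, 100, "Kiwibot 4.1B"),
--         ("4D", 1, 300, "Kiwibot 4.2A"),
--         ("4E", 1, 120, "Kiwibot 4.3B"),
--         ("4E", 121, 130, "Kiwibot 4.3C"),
--         ("4E", 200, 290, "Kiwibot 4.3C"),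
--         ("4F", 1, 262, "Kiwibot 4.3D"),
--         ("4F", 301, 322, "Kiwibot 4.3E"),
--         ("4F", 401, 410, "Kiwibot 4.3F"),
--         ("4G", 1, 5, "Kiwibot 4.3G"),
--         ("4H", 1, 81, "Kiwibot 4.4A"),
--     ]:
--         for n in range(lo, hi + 1):
--             models[(p, n)] = m
--     return models
--
--
-- _MODELS = _build_models()  # exhaustive (prefix, number) -> model lookup table, built once
--
--
-- def get_robot_model_from_id(robot_id: str) -> str:
--     if len(robot_id) < 3:
--         return "Unknown Version"
--     tail = robot_id[2:]
--     digits = tail[: len(tail) - len(tail.lstrip(_DIGITS))]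
--     if not digits:
--         return "Unknown Version"
--     return _MODELS.get((robot_id[:2], int(digits)), "Unknown Version")
-- ===== Notes on version B (the rewrite author's own statement) =====
-- stated objective: alternative
-- what changed: B precomputes once an exhaustive (prefix, number) -> model dictionary with one entry per id in each range and answers each call with a single dict lookup, and parses the number by slicing off the digit-lstripped remainder instead of A's enumerate/break scan.
import Mathlib
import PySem

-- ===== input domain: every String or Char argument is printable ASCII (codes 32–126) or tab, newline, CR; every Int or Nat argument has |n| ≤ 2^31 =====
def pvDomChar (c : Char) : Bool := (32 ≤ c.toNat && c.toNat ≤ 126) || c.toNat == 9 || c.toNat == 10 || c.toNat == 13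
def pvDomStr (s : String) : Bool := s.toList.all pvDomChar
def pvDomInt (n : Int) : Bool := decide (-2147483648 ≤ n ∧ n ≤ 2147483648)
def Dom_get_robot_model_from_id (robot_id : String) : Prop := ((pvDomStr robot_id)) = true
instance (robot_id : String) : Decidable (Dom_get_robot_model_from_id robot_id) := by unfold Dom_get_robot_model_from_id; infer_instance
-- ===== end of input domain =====

-- B replaces A's per-call 12-branch if/elif chain by a single precomputed exhaustive
-- (prefix, number) -> model dictionary queried once, and A's enumerate/break parse by an
-- lstrip-based slice (objective: alternative — trades a one-time table build for an O(1) lookup).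

-- ===== PORT A =====
-- the `for i, char in enumerate(number_str): … else: …` loop; `none` covers both
-- `number = None` and a ValueError from int() (A returns "Unknown Version" in both cases)
def pvALoop (ns : List Char) (i : Nat) (numberStr : List Char) : Option Int :=
  match ns with
  | [] => PySem.Int.ofChars? numberStr
  | c :: rest =>
    if ¬ PySem.Chars.isdigit c then
      if 0 < i then PySem.Int.ofChars? (PySem.List.slice numberStr none (some (i : Int))) else none
    else pvALoop rest (i + 1) numberStr

def get_robot_model_from_id (robot_id : String) : String :=
  let cs := robot_id.toList
  if 3 ≤ cs.length then
    let pfx := PySem.List.slice cs none (some 2)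
    let numberStr := PySem.List.slice cs (some 2) none
    match pvALoop numberStr 0 numberStr with
    | none => "Unknown Version"
    | some number =>
      if pfx = "4A".toList ∧ 1 ≤ number ∧ number ≤ 30 then "Kiwibot 4.0"
      else if pfx = "4B".toList ∧ 1 ≤ number ∧ number ≤ 120 then "Kiwibot 4.1A"
      else if pfx = "4C".toList ∧ 1 ≤ number ∧ number ≤ 100 then "Kiwibot 4.1B"
      else if pfx = "4D".toList ∧ 1 ≤ number ∧ number ≤ 300 then "Kiwibot 4.2A"
      else if pfx = "4E".toList ∧ 1 ≤ number ∧ number ≤ 120 then "Kiwibot 4.3B"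
      else if pfx = "4E".toList ∧ 121 ≤ number ∧ number ≤ 130 then "Kiwibot 4.3C"
      else if pfx = "4E".toList ∧ 200 ≤ number ∧ number ≤ 290 then "Kiwibot 4.3C"
      else if pfx = "4F".toList ∧ 1 ≤ number ∧ number ≤ 262 then "Kiwibot 4.3D"
      else if pfx = "4F".toList ∧ 301 ≤ number ∧ number ≤ 322 then "Kiwibot 4.3E"
      else if pfx = "4F".toList ∧ 401 ≤ number ∧ number ≤ 410 then "Kiwibot 4.3F"
      else if pfx = "4G".toList ∧ 1 ≤ number ∧ number ≤ 5 then "Kiwibot 4.3G"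
      else if pfx = "4H".toList ∧ 1 ≤ number ∧ number ≤ 81 then "Kiwibot 4.4A"
      else "Unknown Version"
  else "Unknown Version"

-- ===== PORT B =====
-- _build_models(): the row list …
def pvRows : List (List Char × Int × Int × String) :=
  [("4A".toList, 1, 30, "Kiwibot 4.0"),
   ("4B".toList, 1, 120, "Kiwibot 4.1A"),
   ("4C".toList, 1, 100, "Kiwibot 4.1B"),
   ("4D".toList, 1, 300, "Kiwibot 4.2A"),
   ("4E".toList, 1, 120, "Kiwibot 4.3B"),
   ("4E".toList, 121, 130, "Kiwibot 4.3C"),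
   ("4E".toList, 200, 290, "Kiwibot 4.3C"),
   ("4F".toList, 1, 262, "Kiwibot 4.3D"),
   ("4F".toList, 301, 322, "Kiwibot 4.3E"),
   ("4F".toList, 401, 410, "Kiwibot 4.3F"),
   ("4G".toList, 1, 5, "Kiwibot 4.3G"),
   ("4H".toList, 1, 81, "Kiwibot 4.4A")]

-- … and the nested `for p, lo, hi, m in rows: for n in range(lo, hi + 1): models[(p, n)] = m`
def pvModels : PySem.Dict (List Char × Int) String :=
  pvRows.foldl
    (fun d r => (PySem.List.pyRange r.2.1 (r.2.2.1 + 1)).foldl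
      (fun d n => d.insert (r.1, n) r.2.2.2) d)
    PySem.Dict.empty

def get_robot_model_from_id_alt (robot_id : String) : String :=
  let cs := robot_id.toList
  if cs.length < 3 then "Unknown Version" else
  let tail := PySem.List.slice cs (some 2) none
  -- tail.lstrip(_DIGITS): drop the leading characters that occur in "0123456789" (exact)
  let stripped := tail.dropWhile (fun c => decide (c ∈ "0123456789".toList))
  let digits := PySem.List.slice tail none (some ((tail.length : Int) - (stripped.length : Int)))
  if digits = [] then "Unknown Version" else
  match PySem.Int.ofChars? digits with  -- int(digits): digits nonempty all-digit, never raises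
  | none => "Unknown Version"
  | some n => pvModels.getD (PySem.List.slice cs none (some 2), n) "Unknown Version"

-- ===== PRECONDITION & SPEC =====
def Spec_get_robot_model_from_id (robot_id : String) (out : String) : Prop := out = get_robot_model_from_id_alt robot_id
instance (robot_id : String) (out : String) : Decidable (Spec_get_robot_model_from_id robot_id out) := by unfold Spec_get_robot_model_from_id; infer_instance

-- ===== CLAIM (what is proved, stated in full; the proofs are below) =====
def Claim_equal_get_robot_model_from_id : Prop := ∀ (robot_id : String), Dom_get_robot_model_from_id robot_id → Spec_get_robot_model_from_id robot_id (get_robot_model_from_id robot_id)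

-- ===== LEMMAS AND PROOFS =====

-- `c in "0123456789"` agrees with `c.isdigit()` on every Char
theorem pvMemDigits (c : Char) : (decide (c ∈ "0123456789".toList)) = PySem.Chars.isdigit c := by
  have h : "0123456789".toList = ['0','1','2','3','4','5','6','7','8','9'] := by decide
  rw [h]
  simp only [PySem.Chars.isdigit, List.mem_cons, List.not_mem_nil, or_false]
  rcases c with ⟨v, hv⟩
  simp only [Char.le_def, Char.ext_iff, UInt32.le_iff_toNat_le, ← UInt32.toNat_inj,
    ← Bool.decide_and, decide_eq_decide,
    show '0'.val.toNat = 48 from rfl, show '1'.val.toNat = 49 from rfl,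
    show '2'.val.toNat = 50 from rfl, show '3'.val.toNat = 51 from rfl,
    show '4'.val.toNat = 52 from rfl, show '5'.val.toNat = 53 from rfl,
    show '6'.val.toNat = 54 from rfl, show '7'.val.toNat = 55 from rfl,
    show '8'.val.toNat = 56 from rfl, show '9'.val.toNat = 57 from rfl]
  omega

-- B's slice `tail[: len(tail) - len(tail.lstrip(_DIGITS))]` is the leading digit run
theorem pvDigitsSlice (tail : List Char) :
    PySem.List.slice tail none
        (some ((tail.length : Int) - ((tail.dropWhile (fun c => decide (c ∈ "0123456789".toList))).length : Int)))
      = tail.takeWhile (fun c => PySem.Chars.isdigit c) := by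
  have hp : (fun c => decide (c ∈ "0123456789".toList)) = fun c => PySem.Chars.isdigit c := by
    funext c; exact pvMemDigits c
  rw [hp]
  have hsum : (tail.takeWhile (fun c => PySem.Chars.isdigit c)).length
      + (tail.dropWhile (fun c => PySem.Chars.isdigit c)).length = tail.length := by
    rw [← List.length_append, List.takeWhile_append_dropWhile]
  have hrw : (tail.length : Int) - ((tail.dropWhile (fun c => PySem.Chars.isdigit c)).length : Int)
      = ((tail.takeWhile (fun c => PySem.Chars.isdigit c)).length : Nat) := by
    omega
  rw [hrw, PySem.List.slice_to_natCast]
  exact (List.prefix_iff_eq_take.mp (List.takeWhile_prefix _)).symm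

-- getD through the inner `for n in range(lo, hi + 1)` insert loop
theorem pvGetD_foldl_range (k : Nat) (lo hi : Int) (hk : (hi - lo).toNat = k)
    (p : List Char) (m : String) (d : PySem.Dict (List Char × Int) String)
    (q : List Char) (x : Int) (dflt : String) :
    ((PySem.List.pyRange lo hi).foldl (fun d n => d.insert (p, n) m) d).getD (q, x) dflt
      = if q = p ∧ lo ≤ x ∧ x < hi then m else d.getD (q, x) dflt := by
  induction k generalizing lo d with
  | zero =>
    rw [show PySem.List.pyRange lo hi = [] by simp [PySem.List.pyRange]; omega]
    simp only [List.foldl_nil]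
    have : ¬ (q = p ∧ lo ≤ x ∧ x < hi) := by rintro ⟨_, h1, h2⟩; omega
    simp [this]
  | succ n ih =>
    have hlt : lo < hi := by omega
    rw [PySem.List.pyRange_one_cons hlt]
    simp only [List.foldl_cons]
    rw [ih (lo + 1) (by omega) (d.insert (p, lo) m)]
    rw [PySem.Dict.getD_insert]
    by_cases hq : q = p
    · subst hq
      simp only [Prod.mk.injEq, true_and]
      split_ifs <;> first | rfl | omega
    · simp [hq, Prod.ext_iff]

theorem pvGetD_foldl_range' (lo hi : Int)
    (p : List Char) (m : String) (d : PySem.Dict (List Char × Int) String)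
    (q : List Char) (x : Int) (dflt : String) :
    ((PySem.List.pyRange lo hi).foldl (fun d n => d.insert (p, n) m) d).getD (q, x) dflt
      = if q = p ∧ lo ≤ x ∧ x < hi then m else d.getD (q, x) dflt :=
  pvGetD_foldl_range (hi - lo).toNat lo hi rfl p m d q x dflt

-- the one dict lookup of B computes exactly A's if/elif chain
theorem pvModels_getD (q : List Char) (x : Int) :
    pvModels.getD (q, x) "Unknown Version" =
      (if q = "4A".toList ∧ 1 ≤ x ∧ x ≤ 30 then "Kiwibot 4.0"
      else if q = "4B".toList ∧ 1 ≤ x ∧ x ≤ 120 then "Kiwibot 4.1A"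
      else if q = "4C".toList ∧ 1 ≤ x ∧ x ≤ 100 then "Kiwibot 4.1B"
      else if q = "4D".toList ∧ 1 ≤ x ∧ x ≤ 300 then "Kiwibot 4.2A"
      else if q = "4E".toList ∧ 1 ≤ x ∧ x ≤ 120 then "Kiwibot 4.3B"
      else if q = "4E".toList ∧ 121 ≤ x ∧ x ≤ 130 then "Kiwibot 4.3C"
      else if q = "4E".toList ∧ 200 ≤ x ∧ x ≤ 290 then "Kiwibot 4.3C"
      else if q = "4F".toList ∧ 1 ≤ x ∧ x ≤ 262 then "Kiwibot 4.3D"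
      else if q = "4F".toList ∧ 301 ≤ x ∧ x ≤ 322 then "Kiwibot 4.3E"
      else if q = "4F".toList ∧ 401 ≤ x ∧ x ≤ 410 then "Kiwibot 4.3F"
      else if q = "4G".toList ∧ 1 ≤ x ∧ x ≤ 5 then "Kiwibot 4.3G"
      else if q = "4H".toList ∧ 1 ≤ x ∧ x ≤ 81 then "Kiwibot 4.4A"
      else "Unknown Version") := by
  unfold pvModels pvRows
  rw [List.foldl_cons, List.foldl_cons, List.foldl_cons, List.foldl_cons, List.foldl_cons, List.foldl_cons, List.foldl_cons, List.foldl_cons, List.foldl_cons, List.foldl_cons, List.foldl_cons, List.foldl_cons, List.foldl_nil]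
  rw [pvGetD_foldl_range', pvGetD_foldl_range', pvGetD_foldl_range', pvGetD_foldl_range', pvGetD_foldl_range', pvGetD_foldl_range', pvGetD_foldl_range', pvGetD_foldl_range', pvGetD_foldl_range', pvGetD_foldl_range', pvGetD_foldl_range', pvGetD_foldl_range', PySem.Dict.getD_empty]
  by_cases hA : q = "4A".toList
  · subst hA
    simp only [show ("4A".toList = "4B".toList) = False from by decide, show ("4A".toList = "4C".toList) = False from by decide, show ("4A".toList = "4D".toList) = False from by decide, show ("4A".toList = "4E".toList) = False from by decide, show ("4A".toList = "4F".toList) = False from by decide, show ("4A".toList = "4G".toList) = False from by decide, show ("4A".toList = "4H".toList) = False from by decide, false_and, if_false, true_and]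
    split_ifs <;> first | rfl | omega
  by_cases hB : q = "4B".toList
  · subst hB
    simp only [show ("4B".toList = "4A".toList) = False from by decide, show ("4B".toList = "4C".toList) = False from by decide, show ("4B".toList = "4D".toList) = False from by decide, show ("4B".toList = "4E".toList) = False from by decide, show ("4B".toList = "4F".toList) = False from by decide, show ("4B".toList = "4G".toList) = False from by decide, show ("4B".toList = "4H".toList) = False from by decide, false_and, if_false, true_and]
    split_ifs <;> first | rfl | omega
  by_cases hC : q = "4C".toList
  · subst hC
    simp only [show ("4C".toList = "4A".toList) = False from by decide, show ("4C".toList = "4B".toList) = False from by decide, show ("4C".toList = "4D".toList) = False from by decide, show ("4C".toList = "4E".toList) = False from by decide, show ("4C".toList = "4F".toList) = False from by decide, show ("4C".toList = "4G".toList) = False from by decide, show ("4C".toList = "4H".toList) = False from by decide, false_and, if_false, true_and]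
    split_ifs <;> first | rfl | omega
  by_cases hD : q = "4D".toList
  · subst hD
    simp only [show ("4D".toList = "4A".toList) = False from by decide, show ("4D".toList = "4B".toList) = False from by decide, show ("4D".toList = "4C".toList) = False from by decide, show ("4D".toList = "4E".toList) = False from by decide, show ("4D".toList = "4F".toList) = False from by decide, show ("4D".toList = "4G".toList) = False from by decide, show ("4D".toList = "4H".toList) = False from by decide, false_and, if_false, true_and]
    split_ifs <;> first | rfl | omega
  by_cases hE : q = "4E".toList
  · subst hE
    simp only [show ("4E".toList = "4A".toList) = False from by decide, show ("4E".toList = "4B".toList) = False from by decide, show ("4E".toList = "4C".toList) = False from by decide, show ("4E".toList = "4D".toList) = False from by decide, show ("4E".toList = "4F".toList) = False from by decide, show ("4E".toList = "4G".toList) = False from by decide, show ("4E".toList = "4H".toList) = False from by decide, false_and, if_false, true_and]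
    split_ifs <;> first | rfl | omega
  by_cases hF : q = "4F".toList
  · subst hF
    simp only [show ("4F".toList = "4A".toList) = False from by decide, show ("4F".toList = "4B".toList) = False from by decide, show ("4F".toList = "4C".toList) = False from by decide, show ("4F".toList = "4D".toList) = False from by decide, show ("4F".toList = "4E".toList) = False from by decide, show ("4F".toList = "4G".toList) = False from by decide, show ("4F".toList = "4H".toList) = False from by decide, false_and, if_false, true_and]
    split_ifs <;> first | rfl | omega
  by_cases hG : q = "4G".toList
  · subst hG
    simp only [show ("4G".toList = "4A".toList) = False from by decide, show ("4G".toList = "4B".toList) = False from by decide, show ("4G".toList = "4C".toList) = False from by decide, show ("4G".toList = "4D".toList) = False from by decide, show ("4G".toList = "4E".toList) = False from by decide, show ("4G".toList = "4F".toList) = False from by decide, show ("4G".toList = "4H".toList) = False from by decide, false_and, if_false, true_and]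
    split_ifs <;> first | rfl | omega
  by_cases hH : q = "4H".toList
  · subst hH
    simp only [show ("4H".toList = "4A".toList) = False from by decide, show ("4H".toList = "4B".toList) = False from by decide, show ("4H".toList = "4C".toList) = False from by decide, show ("4H".toList = "4D".toList) = False from by decide, show ("4H".toList = "4E".toList) = False from by decide, show ("4H".toList = "4F".toList) = False from by decide, show ("4H".toList = "4G".toList) = False from by decide, false_and, if_false, true_and]
    split_ifs <;> first | rfl | omega
  simp only [eq_false hA, eq_false hB, eq_false hC, eq_false hD, eq_false hE, eq_false hF, eq_false hG, eq_false hH, false_and, if_false]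

theorem pvALoop_eq (ns pre : List Char)
    (h : ∀ c ∈ pre, PySem.Chars.isdigit c = true) :
    pvALoop ns pre.length (pre ++ ns) =
      (if pre ++ ns.takeWhile (fun c => PySem.Chars.isdigit c) = [] then none
       else PySem.Int.ofChars? (pre ++ ns.takeWhile (fun c => PySem.Chars.isdigit c))) := by
  induction ns generalizing pre with
  | nil =>
    simp only [pvALoop, List.takeWhile, List.append_nil]
    by_cases hp : pre = []
    · subst hp
      have : PySem.Int.ofChars? ([] : List Char) = none := rfl
      simp [this]
    · simp [hp]
  | cons c rest ih =>
    by_cases hc : PySem.Chars.isdigit c = true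
    · have h' : ∀ x ∈ pre ++ [c], PySem.Chars.isdigit x = true := by
        intro x hx
        rcases List.mem_append.mp hx with hx | hx
        · exact h x hx
        · simp at hx; subst hx; exact hc
      have := ih (pre ++ [c]) h'
      simp only [List.append_assoc, List.singleton_append, List.length_append,
        List.length_singleton] at this
      simpa [pvALoop, hc, List.takeWhile, List.append_assoc] using this
    · simp only [pvALoop, hc, List.takeWhile]
      by_cases hp : pre = []
      · subst hp; simp
      · have hlen : 0 < pre.length := List.length_pos_iff.mpr hp
        have hslice : PySem.List.slice (pre ++ c :: rest) none (some (pre.length : Int)) = pre := by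
          rw [PySem.List.slice_to_natCast]
          simp
        simp [hlen, hslice, hp]

-- ===== VERDICT (by name: the statement is the Claim_ definition above) =====
theorem get_robot_model_from_id_spec : Claim_equal_get_robot_model_from_id := by
  intro robot_id _
  unfold Spec_get_robot_model_from_id get_robot_model_from_id get_robot_model_from_id_alt
  set cs := robot_id.toList with hcs
  by_cases h3 : 3 ≤ cs.length
  · have hlt : ¬ cs.length < 3 := by omega
    have hdrop : PySem.List.slice cs (some 2) none = cs.drop 2 := by
      have := PySem.List.slice_from_natCast cs 2
      simpa using this
    have hloop := pvALoop_eq (cs.drop 2) [] (by simp)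
    simp only [List.nil_append, List.length_nil] at hloop
    simp only [h3, if_true, hlt, if_false, hdrop, hloop, pvDigitsSlice]
    set tail := cs.drop 2 with htail
    set d := tail.takeWhile (fun c => PySem.Chars.isdigit c) with hd
    by_cases hz : d = []
    · simp [hz]
    · simp only [hz, if_false]
      cases hno : PySem.Int.ofChars? d with
      | none => simp
      | some n => simp only [pvModels_getD]
  · have hlt : cs.length < 3 := by omega
    simp [h3, hlt]
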